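-- pv_equiv track=rewrite | github.com/kiyuka829/ifc-graph-viewer | python/ifcx_alpha_accessor.py | get_references
-- ===== SOURCE A (Python) =====
-- from collections import defaultdict
--
-- def flatten_dict(d, parent_key="", sep="::"):
--     items = {}
--     for k, v in d.items():
--         new_key = f"{parent_key}{sep}{k}" if parent_key else k
--         if isinstance(v, dict):
--             items.update(flatten_dict(v, new_key, sep=sep))
--         else:
--             items[new_key] = v
--     return items
--
-- def get_references(nodes):
--     references = defaultdict(list)
--     for identifier, node in nodes.items():
--         children = node.get("children", {})
--         inherits = node.get("inherits", {})
--         for refs in children, inherits: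
--             for _, child_id in refs.items():
--                 references[child_id].append(identifier)
--
--         for _, value in flatten_dict(node["attributes"]).items():
--             if isinstance(value, str) and value in nodes:
--                 references[value].append(identifier)
--
--     return references
-- ===== SOURCE B (Python) =====
-- def get_references(nodes):
--     # Staged: (1) flatten everything into one (target, identifier) edge list,
--     # (2) group that list by target, keys in first-occurrence order, via
--     # comprehensions -- no incremental reverse map is ever maintained.
--     def leaves(v):
--         if isinstance(v, dict):
--             for x in v.values():
--                 yield from leaves(x)
--         else:
--             yield v
--
--     def targets(node):
--         yield from node.get("children", {}).values()
--         yield from node.get("inherits", {}).values()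
--         for v in leaves(node["attributes"]):
--             if isinstance(v, str) and v in nodes:
--                 yield v
--
--     edges = [(t, i) for i, node in nodes.items() for t in targets(node)]
--     return {t: [i for t2, i in edges if t2 == t]
--             for t in dict.fromkeys(t for t, _ in edges)}
-- ===== Notes on version B (the rewrite author's own statement) =====
-- stated objective: alternative
-- what changed: B replaces A's incremental defaultdict building (append per edge as nodes are scanned) with two staged passes: it first flattens all nodes into one (target, identifier) edge list, then groups that list by target with dict.fromkeys + comprehensions, trading A's O(E) grouping for an O(K*E) per-key scan; Pre_ excludes inputs where a node lacks an 'attributes' key, on which A raises KeyError.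
import Mathlib
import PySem

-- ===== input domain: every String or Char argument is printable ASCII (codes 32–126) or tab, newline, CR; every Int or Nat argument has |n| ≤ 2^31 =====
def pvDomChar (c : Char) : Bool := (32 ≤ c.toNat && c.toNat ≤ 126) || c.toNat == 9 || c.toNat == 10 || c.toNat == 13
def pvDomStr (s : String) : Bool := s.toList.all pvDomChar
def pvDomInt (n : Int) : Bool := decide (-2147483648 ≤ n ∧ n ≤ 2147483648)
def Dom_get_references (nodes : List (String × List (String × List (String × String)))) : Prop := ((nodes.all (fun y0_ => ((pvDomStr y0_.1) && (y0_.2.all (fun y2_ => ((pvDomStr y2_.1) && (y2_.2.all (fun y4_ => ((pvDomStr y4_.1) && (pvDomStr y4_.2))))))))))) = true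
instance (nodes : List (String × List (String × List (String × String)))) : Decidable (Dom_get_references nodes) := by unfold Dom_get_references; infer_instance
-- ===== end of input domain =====

-- B replaces A's incremental reverse-map building with two staged passes: a flat
-- (target, identifier) edge list, then group-by via dict.fromkeys + comprehensions
-- (objective: alternative).

-- ===== PORT A =====
-- flatten_dict(d): at this type every value is a string (never a dict), and parent_key
-- is always "" here, so new_key = k and the isinstance(v, dict) branch never fires.
def flatten_dict (d : PySem.Dict String String) : PySem.Dict String String :=
  d.items.foldl (fun items kv => items.insert kv.1 kv.2) PySem.Dict.empty

def get_references (nodes : List (String × List (String × List (String × String)))) : List (String × List String) :=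
  let nd : PySem.Dict String (List (String × List (String × String))) := PySem.Dict.ofList nodes
  let references : PySem.Dict String (List String) :=
    nd.items.foldl (fun references idnode =>
      let identifier := idnode.1
      let node : PySem.Dict String (List (String × String)) := PySem.Dict.ofList idnode.2
      let children : PySem.Dict String String := PySem.Dict.ofList (node.getD "children" [])
      let inherits : PySem.Dict String String := PySem.Dict.ofList (node.getD "inherits" [])
      let references := [children, inherits].foldl (fun references refs =>
        refs.items.foldl (fun references kv =>
          references.modify kv.2 [] (· ++ [identifier])) references) references
      -- node["attributes"]: KeyError when absent (excluded by Pre_); [] default only totalizes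
      (flatten_dict (PySem.Dict.ofList (node.getD "attributes" []))).items.foldl
        (fun references kv =>
          -- isinstance(value, str) is always true at this type
          if nd.contains kv.2 then references.modify kv.2 [] (· ++ [identifier]) else references)
        references)
      PySem.Dict.empty
  references.items

-- ===== PORT B =====
-- targets(node): children values, inherits values, then the attribute leaves
-- (at this flat type leaves(node["attributes"]) yields exactly the dict's values)
def pvTargets (nd : PySem.Dict String (List (String × List (String × String))))
    (node : PySem.Dict String (List (String × String))) : List String :=
  (PySem.Dict.ofList (node.getD "children" [])).values
  ++ (PySem.Dict.ofList (node.getD "inherits" [])).values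
  ++ ((PySem.Dict.ofList (node.getD "attributes" [])).values.filter (fun v => nd.contains v))

def get_references_alt (nodes : List (String × List (String × List (String × String)))) : List (String × List String) :=
  let nd : PySem.Dict String (List (String × List (String × String))) := PySem.Dict.ofList nodes
  let edges : List (String × String) :=
    nd.items.flatMap (fun idnode =>
      (pvTargets nd (PySem.Dict.ofList idnode.2)).map (fun t => (t, idnode.1)))
  -- dict.fromkeys over the edge targets = ordered dedup (PySem.List.dedup)
  (PySem.List.dedup (edges.map Prod.fst)).map
    (fun t => (t, (edges.filter (fun e => e.1 == t)).map Prod.snd))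

-- ===== PRECONDITION & SPEC =====
-- A raises KeyError on node["attributes"] when a (surviving) node has no "attributes" key; Pre_ excludes exactly those.
def Pre_get_references (nodes : List (String × List (String × List (String × String)))) : Prop :=
  ∀ p ∈ (PySem.Dict.ofList nodes).items, "attributes" ∈ p.2.map Prod.fst
instance (nodes : List (String × List (String × List (String × String)))) : Decidable (Pre_get_references nodes) := by unfold Pre_get_references; infer_instance

def pvWitness_get_references : (List (String × List (String × List (String × String)))) :=
  [("a", [("attributes", [("k", "b")])]), ("b", [("attributes", []), ("children", [("c", "a")])])]

def Spec_get_references (nodes : List (String × List (String × List (String × String)))) (out : List (String × List String)) : Prop := out = get_references_alt nodes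
instance (nodes : List (String × List (String × List (String × String)))) (out : List (String × List String)) : Decidable (Spec_get_references nodes out) := by unfold Spec_get_references; infer_instance

-- ===== CLAIM (what is proved, stated in full; the proofs are below) =====
def Claim_equal_get_references : Prop := ∀ (nodes : List (String × List (String × List (String × String)))), Dom_get_references nodes → Pre_get_references nodes → Spec_get_references nodes (get_references nodes)

-- ===== LEMMAS AND PROOFS =====

-- flatten_dict rebuilds its input: inserting a nodup-keyed items list into an empty dict is the identity.
lemma flatten_dict_eq (d : PySem.Dict String String) (hnd : d.keys.Nodup) :
    flatten_dict d = d := by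
  apply PySem.Dict.ext
  unfold flatten_dict
  have h := PySem.Dict.items_foldl_insert_fresh (l := d.items) (k := Prod.fst)
      (v := Prod.snd) (d := PySem.Dict.empty)
      (by simp [PySem.Dict.contains_empty]) (by simpa [PySem.Dict.keys] using hnd)
  simpa using h

-- A's per-node body is the edge-append loop over that node's (target, identifier) edge list.
lemma body_eq_edges (nd : PySem.Dict String (List (String × List (String × String))))
    (idnode : String × List (String × List (String × String)))
    (d : PySem.Dict String (List String)) :
    (let identifier := idnode.1
     let node : PySem.Dict String (List (String × String)) := PySem.Dict.ofList idnode.2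
     let children : PySem.Dict String String := PySem.Dict.ofList (node.getD "children" [])
     let inherits : PySem.Dict String String := PySem.Dict.ofList (node.getD "inherits" [])
     let d' := [children, inherits].foldl (fun references refs =>
        refs.items.foldl (fun references kv =>
          references.modify kv.2 [] (· ++ [identifier])) references) d
     (flatten_dict (PySem.Dict.ofList (node.getD "attributes" []))).items.foldl
        (fun references kv =>
          if nd.contains kv.2 then references.modify kv.2 [] (· ++ [identifier]) else references)
        d')
    = ((pvTargets nd (PySem.Dict.ofList idnode.2)).map (fun t => (t, idnode.1))).foldl
        (fun references p => references.modify p.1 [] (· ++ [p.2])) d := by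
  simp only [List.foldl_cons, List.foldl_nil, pvTargets, List.map_append, List.foldl_append,
    List.foldl_map]
  rw [flatten_dict_eq _ (PySem.Dict.nodup_keys_ofList _)]
  rw [PySem.List.foldl_if_eq_foldl_filter]
  simp only [PySem.Dict.values, List.filter_map, List.foldl_map]
  rfl

-- grouping the flat edge list: the modify-append loop's items are exactly
-- B's dedup-of-targets map with a per-key filter pass
lemma group_items (edges : List (String × String)) :
    (edges.foldl (fun (references : PySem.Dict String (List String)) p =>
        references.modify p.1 [] (· ++ [p.2])) PySem.Dict.empty).items
    = (PySem.List.dedup (edges.map Prod.fst)).map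
        (fun t => (t, (edges.filter (fun e => e.1 == t)).map Prod.snd)) := by
  have hnd : (edges.foldl (fun (references : PySem.Dict String (List String)) p =>
      references.modify p.1 [] (· ++ [p.2])) PySem.Dict.empty).keys.Nodup :=
    PySem.Dict.nodup_keys_foldl_modify_key edges Prod.fst [] (fun d p => (· ++ [p.2]))
      PySem.Dict.empty (by simp [PySem.Dict.keys_empty])
  rw [PySem.Dict.items_eq_map_keys _ hnd []]
  rw [PySem.Dict.keys_foldl_modify_key]
  simp only [PySem.Dict.keys_empty, PySem.Set.update_nil_left, PySem.List.dedup_eq_ofList]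
  apply List.map_congr_left
  intro t _
  rw [PySem.Dict.getD_foldl_modify_append]
  simp [PySem.Dict.getD_empty]

theorem equal_aux (nodes : List (String × List (String × List (String × String)))) :
    get_references nodes = get_references_alt nodes := by
  unfold get_references get_references_alt
  refine Eq.trans (congrArg PySem.Dict.items
      (PySem.List.foldl_congr_mem _ _ _ _
        (fun acc x _ => body_eq_edges (PySem.Dict.ofList nodes) x acc))) ?_
  exact Eq.trans (congrArg PySem.Dict.items (List.foldl_flatMap ..).symm) (group_items _)

-- ===== VERDICT (by name: the statement is the Claim_ definition above) =====
theorem get_references_spec : Claim_equal_get_references := by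
  intro nodes _ _
  exact equal_aux nodes
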